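-- pv_equiv track=rewrite | github.com/zztphy/HomeworkForSTCQP | MySolution/hw_1_TFI.py | CalBasis
-- ===== SOURCE A (Python) =====
-- def CalBasis(N, PriC, PriR):
--     Basis = list()
--     for _i in range(N):
--         Basis.append(list())
--         for _j in range(len(PriC)):
--             if (_i*PriR[_j]) % N == 0:
--                 Basis[_i].append(PriC[_j])
--     return Basis
-- ===== SOURCE B (Python) =====
-- def _gcd(a, b):
--     while b:
--         a, b = b, a % b
--     return a
--
--
-- def CalBasis(N, PriC, PriR):
--     # Column-major: each column j goes exactly to the rows i that are
--     # multiples of N // gcd(|PriR[j]|, N); rows collect columns in j order.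
--     if N <= 0:
--         return []
--     Basis = [[] for _ in range(N)]
--     for _j in range(len(PriC)):
--         step = N // _gcd(abs(PriR[_j]), N)
--         for _i in range(0, N, step):
--             Basis[_i].append(PriC[_j])
--     return Basis
-- ===== Notes on version B (the rewrite author's own statement) =====
-- stated objective: faster
-- what changed: Instead of testing (i*PriR[j]) % N == 0 for every row i and every column j, B goes column-major: it computes step = N // gcd(|PriR[j]|, N) once per column and appends PriC[j] only to the rows 0, step, 2*step, ..., which are exactly the rows satisfying the test; rows still receive columns in ascending j order.
import Mathlib
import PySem

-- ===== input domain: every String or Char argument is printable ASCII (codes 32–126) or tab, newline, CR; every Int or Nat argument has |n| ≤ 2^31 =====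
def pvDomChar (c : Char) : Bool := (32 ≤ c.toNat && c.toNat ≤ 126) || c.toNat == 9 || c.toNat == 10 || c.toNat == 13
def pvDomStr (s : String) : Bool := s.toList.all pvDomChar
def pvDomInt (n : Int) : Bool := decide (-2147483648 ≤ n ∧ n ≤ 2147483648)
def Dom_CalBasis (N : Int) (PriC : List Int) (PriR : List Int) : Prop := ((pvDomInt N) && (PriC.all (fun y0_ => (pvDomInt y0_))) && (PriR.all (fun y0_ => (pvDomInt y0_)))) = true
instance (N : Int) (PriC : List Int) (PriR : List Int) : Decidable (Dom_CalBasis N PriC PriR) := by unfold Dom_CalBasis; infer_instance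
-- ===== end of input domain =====

-- B replaces A's per-cell divisibility test (i*PriR[j]) % N == 0 by a column-major
-- build: per column j it computes step = N // gcd(|PriR[j]|, N) and appends PriC[j]
-- to exactly the rows 0, step, 2*step, …  (objective: faster).

-- ===== PORT A =====
def CalBasis (N : Int) (PriC : List Int) (PriR : List Int) : List (List Int) :=
  (PySem.List.pyRange 0 N 1).foldl (fun Basis _i =>
    -- Basis.append(list()), then the inner loop appends to Basis[_i]
    -- (_i is a valid nonnegative index whenever the branch fires)
    (PySem.List.pyRange 0 (PriC.length : Int) 1).foldl (fun B _j =>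
      if PySem.Int.mod (_i * PySem.List.pyGetD PriR _j 0) N = 0 then
        B.modify _i.toNat (fun row => row ++ [PySem.List.pyGetD PriC _j 0])
      else B) (Basis ++ [([] : List Int)])) []

-- ===== PORT B =====
-- hand-written Euclid loop of Source B; its arguments abs(PriR[_j]) and N are
-- nonnegative ints there, so Nat is exact
def pyGcd (a b : Nat) : Nat :=
  if h : b = 0 then a else pyGcd b (a % b)
termination_by b
decreasing_by exact Nat.mod_lt _ (Nat.pos_of_ne_zero h)

def CalBasis_alt (N : Int) (PriC : List Int) (PriR : List Int) : List (List Int) :=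
  if N ≤ 0 then []
  else
    (PySem.List.pyRange 0 (PriC.length : Int) 1).foldl (fun Basis _j =>
      -- step = N // gcd(abs(PriR[_j]), N), inlined into the range call
      (PySem.List.pyRange 0 N
          (PySem.Int.floordiv N
            ((pyGcd (PySem.List.pyGetD PriR _j 0).natAbs N.toNat : Nat) : Int))).foldl (fun B _i =>
        -- Basis[_i].append(PriC[_j]); _i is a valid nonnegative index here
        B.modify _i.toNat (fun row => row ++ [PySem.List.pyGetD PriC _j 0])) Basis)
      (List.replicate N.toNat ([] : List Int))

-- ===== PRECONDITION & SPEC =====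
-- Pre_ excludes exactly the inputs where the Python A raises IndexError:
-- N ≥ 1 with len(PriC) > len(PriR) (A reads PriR[_j] for every _j < len(PriC)).
def Pre_CalBasis (N : Int) (PriC : List Int) (PriR : List Int) : Prop :=
  N ≤ 0 ∨ PriC.length ≤ PriR.length
instance (N : Int) (PriC : List Int) (PriR : List Int) : Decidable (Pre_CalBasis N PriC PriR) := by unfold Pre_CalBasis; infer_instance

def pvWitness_CalBasis : Int × List Int × List Int := (4, [2, 3], [2, 1, 5])

def Spec_CalBasis (N : Int) (PriC : List Int) (PriR : List Int) (out : List (List Int)) : Prop := out = CalBasis_alt N PriC PriR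
instance (N : Int) (PriC : List Int) (PriR : List Int) (out : List (List Int)) : Decidable (Spec_CalBasis N PriC PriR out) := by unfold Spec_CalBasis; infer_instance

-- ===== CLAIM (what is proved, stated in full; the proofs are below) =====
def Claim_equal_CalBasis : Prop := ∀ (N : Int) (PriC : List Int) (PriR : List Int), Dom_CalBasis N PriC PriR → Pre_CalBasis N PriC PriR → Spec_CalBasis N PriC PriR (CalBasis N PriC PriR)


-- ===== LEMMAS AND PROOFS =====

-- abbreviations for the proofs
def pvR (PriR : List Int) (j : Nat) : Int := PySem.List.pyGetD PriR (j : Int) 0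
def pvC (PriC : List Int) (j : Nat) : Int := PySem.List.pyGetD PriC (j : Int) 0

-- the common model: row i after processing the first t columns
def pvRow (N : Int) (PriC PriR : List Int) (t i : Nat) : List Int :=
  (List.range t).foldl
    (fun acc j => if PySem.Int.mod ((i : Int) * pvR PriR j) N = 0 then acc ++ [pvC PriC j] else acc) []

theorem pv_modify_append (S : List (List Int)) (x : List Int) (f : List Int → List Int) :
    (S ++ [x]).modify S.length f = S ++ [f x] := by
  induction S with
  | nil => simp [List.modify]
  | cons a S ih => simpa [List.modify_succ_cons] using ih

theorem pv_innerA (m : Nat) (p : Nat → Prop) [DecidablePred p] (c : Nat → Int)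
    (S : List (List Int)) (i : Nat) (hi : S.length = i) :
    (List.range m).foldl
        (fun B j => if p j then B.modify i (fun r => r ++ [c j]) else B) (S ++ [[]])
      = S ++ [(List.range m).foldl (fun acc j => if p j then acc ++ [c j] else acc) []] := by
  subst hi
  suffices h : ∀ (row : List Int),
      (List.range m).foldl
          (fun B j => if p j then B.modify S.length (fun r => r ++ [c j]) else B) (S ++ [row])
        = S ++ [(List.range m).foldl (fun acc j => if p j then acc ++ [c j] else acc) row] by
    exact h []
  induction m with
  | zero => intro row; simp
  | succ t ih =>
      intro row
      rw [List.range_succ, List.foldl_append, List.foldl_append, ih]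
      by_cases hp : p t
      · simp only [List.foldl_cons, List.foldl_nil, if_pos hp, pv_modify_append]
      · simp only [List.foldl_cons, List.foldl_nil, if_neg hp]

theorem pv_foldA (M : Int) (PriC PriR : List Int) (t : Nat) :
    (List.range t).foldl
      (fun Basis (k : Nat) =>
        (List.map (fun (j : Nat) => (j : Int)) (List.range PriC.length)).foldl
          (fun B j =>
            if PySem.Int.mod ((k : Int) * PySem.List.pyGetD PriR j 0) M = 0 then
              B.modify (k : Int).toNat (fun row => row ++ [PySem.List.pyGetD PriC j 0])
            else B)
          (Basis ++ [([] : List Int)])) []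
      = (List.range t).map (pvRow M PriC PriR PriC.length) := by
  induction t with
  | zero => simp
  | succ t ih =>
      rw [List.range_succ, List.foldl_append, List.map_append, ih, List.foldl_cons,
        List.foldl_nil, List.foldl_map]
      simp only [Int.toNat_natCast]
      rw [pv_innerA PriC.length
        (fun j => PySem.Int.mod ((t : Int) * PySem.List.pyGetD PriR (j : Int) 0) M = 0)
        (fun j => PySem.List.pyGetD PriC (j : Int) 0)
        ((List.range t).map (pvRow M PriC PriR PriC.length)) t (by simp)]
      rfl

theorem pv_A_model (N : Int) (PriC PriR : List Int) (hN : 0 < N) :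
    CalBasis N PriC PriR = (List.range N.toNat).map (pvRow N PriC PriR PriC.length) := by
  unfold CalBasis
  rw [show N = ((N.toNat : Nat) : Int) from (Int.toNat_of_nonneg hN.le).symm]
  rw [PySem.List.pyRange_zero_natCast N.toNat, List.foldl_map,
    PySem.List.pyRange_zero_natCast PriC.length, Int.toNat_natCast]
  exact pv_foldA ((N.toNat : Nat) : Int) PriC PriR N.toNat

theorem pv_foldRangeModify (step' : Nat) (hs : 0 < step') (x : Int) (t : Nat)
    (S : List (List Int)) (k : Nat) :
    ((List.range t).foldl (fun B u => B.modify (step' * u) (fun r => r ++ [x])) S)[k]?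
      = if ∃ u, u < t ∧ k = step' * u then S[k]?.map (fun r => r ++ [x]) else S[k]? := by
  induction t with
  | zero =>
      simp only [List.range_zero, List.foldl_nil]
      rw [if_neg]; rintro ⟨u, hu, -⟩; omega
  | succ t ih =>
      rw [List.range_succ, List.foldl_append, List.foldl_cons, List.foldl_nil,
        List.getElem?_modify, ih]
      by_cases hk : step' * t = k
      · have hnot : ¬ ∃ u, u < t ∧ k = step' * u := by
          rintro ⟨u, hu, rfl⟩
          exact absurd (Nat.eq_of_mul_eq_mul_left hs hk) (by omega)
        have hyes : ∃ u, u < t + 1 ∧ k = step' * u := ⟨t, by omega, hk.symm⟩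
        rw [if_neg hnot, if_pos hyes]
        cases S[k]? <;> simp [hk]
      · have hiff : (∃ u, u < t + 1 ∧ k = step' * u) ↔ (∃ u, u < t ∧ k = step' * u) := by
          constructor
          · rintro ⟨u, hu, rfl⟩
            refine ⟨u, ?_, rfl⟩
            rcases Nat.lt_succ_iff_lt_or_eq.mp hu with h | rfl
            · exact h
            · exact absurd rfl hk
          · rintro ⟨u, hu, rfl⟩; exact ⟨u, by omega, rfl⟩
        simp only [hiff]
        split_ifs <;> cases S[k]? <;> simp [hk]

theorem pv_colStep (N step : Int) (hN : 0 < N) (hstep : 0 < step) (x : Int)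
    (S : List (List Int)) (hS : S.length = N.toNat) (k : Nat) :
    ((PySem.List.pyRange 0 N step).foldl
        (fun B i => B.modify i.toNat (fun r => r ++ [x])) S)[k]?
      = if step.toNat ∣ k then S[k]?.map (fun r => r ++ [x]) else S[k]? := by
  rw [PySem.List.pyRange_of_pos 0 N hstep]
  simp only [if_pos hN, sub_zero, zero_add]
  rw [List.foldl_map]
  have hcast : ∀ u : Nat, (step * (u : Int)).toNat = step.toNat * u := by
    intro u
    rw [Int.toNat_mul hstep.le (Int.natCast_nonneg u), Int.toNat_natCast]
  simp only [hcast]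
  have hs' : 0 < step.toNat := by omega
  rw [pv_foldRangeModify step.toNat hs' x _ S k]
  by_cases hk : k < N.toNat
  · have hcnt : ∀ u : Nat, u < ((N + step - 1) / step).toNat ↔ step.toNat * u < N.toNat := by
      intro u
      rw [Int.lt_toNat, Int.lt_iff_add_one_le, Int.le_ediv_iff_mul_le hstep]
      have h1 : ((u : Int) + 1) * step = step * (u : Int) + step := by ring
      rw [h1]
      have h2 : step * (u : Int) = ((step.toNat * u : Nat) : Int) := by
        push_cast [Int.toNat_of_nonneg hstep.le]; ring
      rw [h2]
      omega
    have : (∃ u, u < ((N + step - 1) / step).toNat ∧ k = step.toNat * u) ↔ step.toNat ∣ k := by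
      constructor
      · rintro ⟨u, -, rfl⟩; exact Dvd.intro u rfl
      · rintro ⟨u, rfl⟩
        exact ⟨u, (hcnt u).mpr hk, rfl⟩
    simp only [this]
  · have hk1 : S[k]? = none := by rw [List.getElem?_eq_none]; omega
    split_ifs <;> simp [hk1]


def pvStep (N : Int) (PriR : List Int) (j : Nat) : Int :=
  PySem.Int.floordiv N ((pyGcd (pvR PriR j).natAbs N.toNat : Nat) : Int)

theorem pv_pyGcd_eq (a b : Nat) : pyGcd a b = Nat.gcd b a := by
  induction b using Nat.strong_induction_on generalizing a with
  | _ b ih =>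
    rw [pyGcd]
    by_cases h : b = 0
    · simp [h]
    · rw [dif_neg h, ih (a % b) (Nat.mod_lt _ (Nat.pos_of_ne_zero h)) b,
        Nat.gcd_rec b a]

theorem pv_step_eq (N : Int) (PriR : List Int) (hN : 0 < N) (j : Nat) :
    pvStep N PriR j = ((N.toNat / Nat.gcd N.toNat (pvR PriR j).natAbs : Nat) : Int) := by
  unfold pvStep
  rw [pv_pyGcd_eq,
    show PySem.Int.floordiv N = PySem.Int.floordiv ((N.toNat : Nat) : Int) from by
      rw [Int.toNat_of_nonneg hN.le],
    PySem.Int.floordiv_natCast]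

theorem pv_step_pos (N : Int) (PriR : List Int) (hN : 0 < N) (j : Nat) :
    0 < pvStep N PriR j := by
  rw [pv_step_eq N PriR hN j]
  have hg : 0 < Nat.gcd N.toNat (pvR PriR j).natAbs :=
    Nat.gcd_pos_of_pos_left _ (by omega)
  have hdvd : Nat.gcd N.toNat (pvR PriR j).natAbs ∣ N.toNat := Nat.gcd_dvd_left _ _
  have : 0 < N.toNat / Nat.gcd N.toNat (pvR PriR j).natAbs :=
    Nat.div_pos (Nat.le_of_dvd (by omega) hdvd) hg
  omega

theorem pv_natKey (n a i : Nat) (hn : 0 < n) : (n ∣ i * a) ↔ (n / Nat.gcd n a ∣ i) := by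
  have hg : 0 < Nat.gcd n a := Nat.gcd_pos_of_pos_left _ hn
  have h1 : n / Nat.gcd n a * Nat.gcd n a = n := Nat.div_mul_cancel (Nat.gcd_dvd_left n a)
  have h2 : a / Nat.gcd n a * Nat.gcd n a = a := Nat.div_mul_cancel (Nat.gcd_dvd_right n a)
  have hcop : Nat.Coprime (n / Nat.gcd n a) (a / Nat.gcd n a) :=
    Nat.coprime_div_gcd_div_gcd hg
  constructor
  · intro h
    have h3 : n / Nat.gcd n a * Nat.gcd n a ∣ i * (a / Nat.gcd n a) * Nat.gcd n a := by
      rw [h1, mul_assoc, h2]; exact h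
    exact hcop.dvd_of_dvd_mul_right ((Nat.mul_dvd_mul_iff_right hg).mp h3)
  · intro h
    have h3 : n / Nat.gcd n a * Nat.gcd n a ∣ i * (a / Nat.gcd n a) * Nat.gcd n a :=
      Nat.mul_dvd_mul (h.mul_right _) dvd_rfl
    rw [h1, mul_assoc, h2] at h3
    exact h3

theorem pv_cond (N : Int) (PriR : List Int) (hN : 0 < N) (j i : Nat) :
    ((pvStep N PriR j).toNat ∣ i) ↔ PySem.Int.mod ((i : Int) * pvR PriR j) N = 0 := by
  rw [PySem.Int.mod_eq_zero_iff_dvd, pv_step_eq N PriR hN j, Int.toNat_natCast,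
    show N = ((N.toNat : Nat) : Int) from (Int.toNat_of_nonneg hN.le).symm,
    Int.ofNat_dvd_left, Int.natAbs_mul, Int.natAbs_natCast]
  exact (pv_natKey N.toNat (pvR PriR j).natAbs i (by omega)).symm

theorem pv_foldB (N : Int) (PriC PriR : List Int) (hN : 0 < N) (t : Nat) :
    (List.range t).foldl
      (fun Basis (j : Nat) =>
        (PySem.List.pyRange 0 N
            (PySem.Int.floordiv N
              ((pyGcd (PySem.List.pyGetD PriR (j : Int) 0).natAbs N.toNat : Nat) : Int))).foldl
          (fun B i => B.modify i.toNat (fun row => row ++ [PySem.List.pyGetD PriC (j : Int) 0]))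
          Basis)
      (List.replicate N.toNat ([] : List Int))
    = (List.range N.toNat).map (fun i =>
        (List.range t).foldl
          (fun acc j => if (pvStep N PriR j).toNat ∣ i then acc ++ [pvC PriC j] else acc) []) := by
  induction t with
  | zero =>
      simp only [List.range_zero, List.foldl_nil]
      apply List.ext_getElem?
      intro k
      by_cases hk : k < N.toNat
      · rw [List.getElem?_replicate, if_pos hk, List.getElem?_map, List.getElem?_range hk]
        rfl
      · rw [List.getElem?_replicate, if_neg hk, Eq.comm, List.getElem?_eq_none]
        simp; omega
  | succ t ih =>
      rw [List.range_succ, List.foldl_append, List.foldl_cons, List.foldl_nil, ih]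
      apply List.ext_getElem?
      intro k
      rw [show PySem.Int.floordiv N
          ((pyGcd (PySem.List.pyGetD PriR (t : Int) 0).natAbs N.toNat : Nat) : Int)
          = pvStep N PriR t from rfl]
      rw [pv_colStep N (pvStep N PriR t) hN (pv_step_pos N PriR hN t)
        (PySem.List.pyGetD PriC (t : Int) 0) _ (by simp)]
      by_cases hkN : k < N.toNat
      · rw [List.getElem?_map, List.getElem?_map, List.getElem?_range hkN]
        simp only [Option.map_some, List.range_succ, List.foldl_append,
          List.foldl_cons, List.foldl_nil]
        split_ifs <;> rfl
      · have h1 : ((List.range N.toNat).map (fun i =>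
            (List.range t).foldl
              (fun acc j => if (pvStep N PriR j).toNat ∣ i then acc ++ [pvC PriC j] else acc)
              []))[k]? = none := by
          rw [List.getElem?_eq_none]; simp; omega
        have h2 : ((List.range N.toNat).map (fun i =>
            ((List.range t) ++ [t]).foldl
              (fun acc j => if (pvStep N PriR j).toNat ∣ i then acc ++ [pvC PriC j] else acc)
              []))[k]? = none := by
          rw [List.getElem?_eq_none]; simp; omega
        rw [h2]
        split_ifs <;> rw [h1] <;> rfl

theorem pv_B_model (N : Int) (PriC PriR : List Int) (hN : 0 < N) :
    CalBasis_alt N PriC PriR = (List.range N.toNat).map (fun i =>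
      (List.range PriC.length).foldl
        (fun acc j => if (pvStep N PriR j).toNat ∣ i then acc ++ [pvC PriC j] else acc) []) := by
  unfold CalBasis_alt
  rw [if_neg (by omega), PySem.List.pyRange_zero_natCast PriC.length, List.foldl_map]
  exact pv_foldB N PriC PriR hN PriC.length

theorem pv_row_eq (N : Int) (PriC PriR : List Int) (hN : 0 < N) (m i : Nat) :
    (List.range m).foldl
        (fun acc j => if (pvStep N PriR j).toNat ∣ i then acc ++ [pvC PriC j] else acc) []
      = pvRow N PriC PriR m i := by
  unfold pvRow
  induction m with
  | zero => rfl
  | succ t ih =>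
      rw [List.range_succ, List.foldl_append, List.foldl_append, ih]
      simp only [List.foldl_cons, List.foldl_nil]
      rw [if_congr (pv_cond N PriR hN t i) rfl rfl]

theorem CalBasis_equal : ∀ (N : Int) (PriC : List Int) (PriR : List Int),
    CalBasis N PriC PriR = CalBasis_alt N PriC PriR := by
  intro N PriC PriR
  by_cases hN : 0 < N
  · rw [pv_A_model N PriC PriR hN, pv_B_model N PriC PriR hN]
    exact (List.map_congr_left (fun i _ => pv_row_eq N PriC PriR hN PriC.length i)).symm
  · unfold CalBasis CalBasis_alt
    rw [if_pos (show N ≤ 0 by omega),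
      PySem.List.pyRange_one_eq_nil (a := 0) (b := N) (by omega), List.foldl_nil]

-- ===== VERDICT (by name: the statement is the Claim_ definition above) =====
theorem CalBasis_spec : Claim_equal_CalBasis := by
  intro N PriC PriR _ _
  exact CalBasis_equal N PriC PriR
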